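-- pv_equiv track=rewrite | github.com/Denubis/letterfreq | letterfreq/grouping.py | sort_bucket_words
-- ===== SOURCE A (Python) =====
-- from collections.abc import Iterable
--
-- def sort_bucket_words(
--     words: Iterable[str],
--     us_dict: frozenset[str],
-- ) -> list[tuple[str, bool]]:
--     """Sort a bucket's words dict-resident-first, alphabetical within each group.
--
--     Returns a list of (word, is_dict_resident) pairs. Words in the US dict
--     come first (alphabetically), then non-dict words (alphabetically). The
--     boolean lets callers visually mark dict-resident entries in the rendered
--     expansion panel.
--     """
--     in_dict: list[str] = []
--     out_of_dict: list[str] = []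
--     for word in words:
--         if word in us_dict:
--             in_dict.append(word)
--         else:
--             out_of_dict.append(word)
--     in_dict.sort()
--     out_of_dict.sort()
--     return [(w, True) for w in in_dict] + [(w, False) for w in out_of_dict]
-- ===== SOURCE B (Python) =====
-- def sort_bucket_words(words, us_dict):
--     pairs = [(w, w in us_dict) for w in words]
--     return sorted(pairs, key=lambda p: (not p[1], p[0]))
-- ===== Notes on version B (the rewrite author's own statement) =====
-- stated objective: simpler
-- what changed: Replaces the two-bucket partition plus two separate sorts and concatenation with a single pass that tags each word with its dict membership followed by one sort on the composite key (not in_dict, word).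
import Mathlib
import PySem

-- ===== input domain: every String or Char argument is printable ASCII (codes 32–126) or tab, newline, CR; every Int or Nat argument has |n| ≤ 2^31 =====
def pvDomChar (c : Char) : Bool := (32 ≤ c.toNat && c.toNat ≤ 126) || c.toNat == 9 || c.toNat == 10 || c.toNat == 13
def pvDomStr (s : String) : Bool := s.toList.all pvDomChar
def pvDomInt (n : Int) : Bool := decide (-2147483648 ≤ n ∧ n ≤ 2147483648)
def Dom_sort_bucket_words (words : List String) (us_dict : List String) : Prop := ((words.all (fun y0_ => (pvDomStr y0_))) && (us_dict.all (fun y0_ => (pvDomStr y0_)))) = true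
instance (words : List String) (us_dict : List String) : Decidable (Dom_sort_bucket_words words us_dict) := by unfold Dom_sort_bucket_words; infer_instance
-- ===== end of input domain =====

-- B replaces A's partition-into-two-buckets + two sorts + concatenation by tagging each
-- word with its dict membership in one pass and doing a single sort on the composite key
-- (not in_dict, word); objective: simpler.


-- ===== PORT A =====
def sort_bucket_words (words : List String) (us_dict : List String) : List (String × Bool) :=
  -- the for loop partitioning into (in_dict, out_of_dict)
  let st := words.foldl
    (fun (acc : List String × List String) word =>
      if us_dict.contains word then (acc.1 ++ [word], acc.2) else (acc.1, acc.2 ++ [word]))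
    ([], [])
  let in_dict := PySem.List.sorted st.1 (fun w => w) false
  let out_of_dict := PySem.List.sorted st.2 (fun w => w) false
  in_dict.map (fun w => (w, true)) ++ out_of_dict.map (fun w => (w, false))

-- ===== PORT B =====
def sort_bucket_words_alt (words : List String) (us_dict : List String) : List (String × Bool) :=
  let pairs := words.map (fun w => (w, us_dict.contains w))
  PySem.List.sorted2 pairs (fun p => !p.2) (fun p => p.1) false

-- ===== PRECONDITION & SPEC =====
def Spec_sort_bucket_words (words : List String) (us_dict : List String) (out : List (String × Bool)) : Prop := out = sort_bucket_words_alt words us_dict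
instance (words : List String) (us_dict : List String) (out : List (String × Bool)) : Decidable (Spec_sort_bucket_words words us_dict out) := by unfold Spec_sort_bucket_words; infer_instance

-- ===== CLAIM (what is proved, stated in full; the proofs are below) =====
def Claim_equal_sort_bucket_words : Prop := ∀ (words : List String) (us_dict : List String), Dom_sort_bucket_words words us_dict → Spec_sort_bucket_words words us_dict (sort_bucket_words words us_dict)

-- ===== LEMMAS AND PROOFS =====

-- the composite sort key both sides are ordered by
def pvKey (p : String × Bool) : Bool ×ₗ String := toLex (!p.2, p.1)

theorem pvKey_injective : Function.Injective pvKey := by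
  intro p q h
  unfold pvKey at h
  have h' : ((!p.2, p.1) : Bool × String) = (!q.2, q.1) := toLex.injective h
  have h1 := congrArg Prod.fst h'
  have h2 := congrArg Prod.snd h'
  simp at h1 h2
  exact Prod.ext h2 h1

-- sorted2 with two linearly ordered keys is sorted with the lexicographic key
theorem sorted2_eq_sorted_toLex {α κ₁ κ₂ : Type} [LinearOrder κ₁] [LinearOrder κ₂]
    (xs : List α) (k1 : α → κ₁) (k2 : α → κ₂) :
    PySem.List.sorted2 xs k1 k2 false
      = PySem.List.sorted xs (fun x => toLex (k1 x, k2 x)) false := by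
  rw [PySem.List.sorted_eq_foldl_insertBy]
  have hbefore : (fun a b : α =>
      decide (k1 a < k1 b) || (!decide (k1 b < k1 a) && decide (k2 a < k2 b)))
      = (fun a b : α =>
      decide ((fun x => toLex (k1 x, k2 x)) a < (fun x => toLex (k1 x, k2 x)) b)) := by
    funext a b
    rcases lt_trichotomy (k1 a) (k1 b) with h | h | h
    · simp [Prod.Lex.toLex_lt_toLex, h, not_lt_of_gt h]
    · simp [Prod.Lex.toLex_lt_toLex, h]
    · simp [Prod.Lex.toLex_lt_toLex, h, not_lt_of_gt h, h.ne']
  unfold PySem.List.sorted2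
  simp only [if_neg (by decide : ¬ (false = true))]
  rw [hbefore]

theorem fold_partition (us_dict : List String) (words : List String)
    (a b : List String) :
    words.foldl
      (fun (acc : List String × List String) word =>
        if us_dict.contains word then (acc.1 ++ [word], acc.2) else (acc.1, acc.2 ++ [word]))
      (a, b)
    = (a ++ words.filter (fun w => us_dict.contains w),
       b ++ words.filter (fun w => !us_dict.contains w)) := by
  induction words generalizing a b with
  | nil => simp
  | cons w ws ih =>
    rw [List.foldl_cons]
    by_cases h : us_dict.contains w = true
    · rw [if_pos h, ih]
      have h' : w ∈ us_dict := by simpa using h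
      simp [h']
    · rw [if_neg h, ih]
      have h' : w ∉ us_dict := by simpa using h
      simp [h']

theorem sort_bucket_words_perm (words us_dict : List String) :
    (sort_bucket_words words us_dict).Perm
      (words.map (fun w => (w, us_dict.contains w))) := by
  unfold sort_bucket_words
  simp only [fold_partition us_dict words [] [], List.nil_append]
  have hin : (words.filter (fun w => us_dict.contains w)).map (fun w => (w, true))
      = (words.filter (fun w => us_dict.contains w)).map (fun w => (w, us_dict.contains w)) := by
    apply List.map_congr_left
    intro w hw
    have h : w ∈ us_dict := by simpa using (List.mem_filter.mp hw).2
    simp [h]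
  have hout : (words.filter (fun w => !us_dict.contains w)).map (fun w => (w, false))
      = (words.filter (fun w => !us_dict.contains w)).map (fun w => (w, us_dict.contains w)) := by
    apply List.map_congr_left
    intro w hw
    have h : w ∉ us_dict := by simpa using (List.mem_filter.mp hw).2
    simp [h]
  refine List.Perm.trans
    (List.Perm.append
      (((PySem.List.sorted_perm _ _ _).map _).trans (by rw [hin]))
      (((PySem.List.sorted_perm _ _ _).map _).trans (by rw [hout]))) ?_
  rw [← List.map_append]
  exact (List.filter_append_perm _ words).map _

theorem sort_bucket_words_pairwise (words us_dict : List String) :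
    (sort_bucket_words words us_dict).Pairwise (fun a b => pvKey a ≤ pvKey b) := by
  unfold sort_bucket_words
  rw [List.pairwise_append]
  refine ⟨?_, ?_, ?_⟩
  · rw [List.pairwise_map]
    refine (PySem.List.sorted_pairwise _ _).imp ?_
    intro a b h
    simp [pvKey, Prod.Lex.toLex_le_toLex, h]
  · rw [List.pairwise_map]
    refine (PySem.List.sorted_pairwise _ _).imp ?_
    intro a b h
    simp [pvKey, Prod.Lex.toLex_le_toLex, h]
  · intro a ha b hb
    rcases List.mem_map.mp ha with ⟨w, _, rfl⟩
    rcases List.mem_map.mp hb with ⟨v, _, rfl⟩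
    simp [pvKey, Prod.Lex.toLex_le_toLex]

theorem sort_bucket_words_alt_eq (words us_dict : List String) :
    sort_bucket_words_alt words us_dict
      = PySem.List.sorted (words.map (fun w => (w, us_dict.contains w))) pvKey false := by
  unfold sort_bucket_words_alt
  rw [sorted2_eq_sorted_toLex]
  rfl

-- ===== VERDICT (by name: the statement is the Claim_ definition above) =====
theorem sort_bucket_words_spec : Claim_equal_sort_bucket_words := by
  intro words us_dict _
  unfold Spec_sort_bucket_words
  rw [sort_bucket_words_alt_eq]
  refine PySem.List.eq_of_perm_of_pairwise_le_of_injective pvKey pvKey_injective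
    ((sort_bucket_words_perm words us_dict).trans (PySem.List.sorted_perm _ _ _).symm)
    (sort_bucket_words_pairwise words us_dict)
    (PySem.List.sorted_pairwise _ _)
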